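-- pv_equiv track=rewrite | github.com/Aaron-Cue/IP | CMS2/templates/sePuedeLlegar.py | soloLlegaUnVueloACadaCiudad
-- ===== SOURCE A (Python) =====
-- from typing import List
-- from typing import Tuple
--
-- def soloLlegaUnVueloACadaCiudad(vuelos: List[Tuple[str, str]]) -> bool:
--     # True si cada segundo elemento de las tuplas son distintos
--     if len(vuelos) == 1:
--         return True
--
--     for i in range(len(vuelos)):
--         j = i + 1
--         while j < len(vuelos):
--             if vuelos[j][1] == vuelos[i][1]:
--                 return False
--             j += 1
--
--     return True
-- ===== SOURCE B (Python) =====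
-- def soloLlegaUnVueloACadaCiudad(vuelos):
--     dests = [v[1] for v in vuelos]
--     return len(set(dests)) == len(dests)
-- ===== Notes on version B (the rewrite author's own statement) =====
-- stated objective: faster
-- what changed: Replaces A's nested pairwise index loops with one pass collecting destinations and a cardinality comparison len(set(dests)) == len(dests).
import Mathlib
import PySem

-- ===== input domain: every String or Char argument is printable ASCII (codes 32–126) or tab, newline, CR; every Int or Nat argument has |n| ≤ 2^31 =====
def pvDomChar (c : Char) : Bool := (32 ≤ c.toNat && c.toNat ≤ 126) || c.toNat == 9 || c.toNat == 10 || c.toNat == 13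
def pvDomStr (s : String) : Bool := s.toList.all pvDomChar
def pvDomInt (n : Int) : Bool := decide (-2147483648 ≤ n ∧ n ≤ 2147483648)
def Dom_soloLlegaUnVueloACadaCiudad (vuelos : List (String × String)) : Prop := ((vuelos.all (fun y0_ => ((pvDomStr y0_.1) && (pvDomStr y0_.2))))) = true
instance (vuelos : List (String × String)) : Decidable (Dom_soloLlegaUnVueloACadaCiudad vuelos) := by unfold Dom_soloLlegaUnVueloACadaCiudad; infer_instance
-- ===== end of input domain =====

-- B replaces A's nested pairwise comparison loops with a single pass collecting
-- destinations and a cardinality comparison (len(set(dests)) == len(dests)); simpler.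


-- ===== PORT A =====
-- inner 'while j < len(vuelos): if vuelos[j][1] == vuelos[i][1]: return False; j += 1'
def pvLoopJ (vuelos : List (String × String)) (vi : String) (j : Nat) : Bool :=
  if h : j < vuelos.length then
    if vuelos[j].2 == vi then false
    else pvLoopJ vuelos vi (j + 1)
  else true
termination_by vuelos.length - j

-- outer 'for i in range(len(vuelos)):' with the early 'return False' propagated
def pvLoopI (vuelos : List (String × String)) (i : Nat) : Bool :=
  if h : i < vuelos.length then
    if pvLoopJ vuelos vuelos[i].2 (i + 1) then pvLoopI vuelos (i + 1)
    else false
  else true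
termination_by vuelos.length - i

def soloLlegaUnVueloACadaCiudad (vuelos : List (String × String)) : Bool :=
  if vuelos.length == 1 then true
  else pvLoopI vuelos 0

-- ===== PORT B =====
def soloLlegaUnVueloACadaCiudad_alt (vuelos : List (String × String)) : Bool :=
  let dests := vuelos.map (fun v => v.2)
  (PySem.Set.ofList dests).length == dests.length

-- ===== PRECONDITION & SPEC =====
def Spec_soloLlegaUnVueloACadaCiudad (vuelos : List (String × String)) (out : Bool) : Prop := out = soloLlegaUnVueloACadaCiudad_alt vuelos
instance (vuelos : List (String × String)) (out : Bool) : Decidable (Spec_soloLlegaUnVueloACadaCiudad vuelos out) := by unfold Spec_soloLlegaUnVueloACadaCiudad; infer_instance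

-- ===== CLAIM (what is proved, stated in full; the proofs are below) =====
def Claim_equal_soloLlegaUnVueloACadaCiudad : Prop := ∀ (vuelos : List (String × String)), Dom_soloLlegaUnVueloACadaCiudad vuelos → Spec_soloLlegaUnVueloACadaCiudad vuelos (soloLlegaUnVueloACadaCiudad vuelos)

-- ===== LEMMAS AND PROOFS =====

-- the inner while-loop scans indices k ≥ j for a destination equal to vi
theorem pvLoopJ_eq_true_iff (vuelos : List (String × String)) (vi : String) (j : Nat) :
    pvLoopJ vuelos vi j = true ↔ ∀ k (hk : k < vuelos.length), j ≤ k → vuelos[k].2 ≠ vi := by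
  induction j using pvLoopJ.induct vuelos vi with
  | case1 j h heq =>
    rw [pvLoopJ, dif_pos h, if_pos heq]
    simp only [Bool.false_eq_true, false_iff, not_forall]
    exact ⟨j, h, le_refl j, by simpa using heq⟩
  | case2 j h hne ih =>
    rw [pvLoopJ, dif_pos h, if_neg hne, ih]
    constructor
    · intro hall k hk hjk
      rcases Nat.eq_or_lt_of_le hjk with rfl | hlt
      · simpa using hne
      · exact hall k hk hlt
    · intro hall k hk hjk
      exact hall k hk (Nat.le_of_succ_le hjk)
  | case3 j h =>
    rw [pvLoopJ, dif_neg h]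
    simp only [true_iff]
    intro k hk hjk
    omega

-- the outer for-loop checks pairwise distinctness among indices ≥ i
theorem pvLoopI_eq_true_iff (vuelos : List (String × String)) (i : Nat) :
    pvLoopI vuelos i = true ↔
      ∀ a b (ha : a < vuelos.length) (hb : b < vuelos.length),
        i ≤ a → a < b → vuelos[a].2 ≠ vuelos[b].2 := by
  induction i using pvLoopI.induct vuelos with
  | case1 i h hj ih =>
    rw [pvLoopI, dif_pos h, if_pos hj, ih]
    rw [pvLoopJ_eq_true_iff] at hj
    constructor
    · intro hall a b ha hb hia hab
      rcases Nat.eq_or_lt_of_le hia with rfl | hlt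
      · exact fun hEq => hj b hb hab hEq.symm
      · exact hall a b ha hb hlt hab
    · intro hall a b ha hb hia hab
      exact hall a b ha hb (Nat.le_of_succ_le hia) hab
  | case2 i h hj =>
    rw [pvLoopI, dif_pos h, if_neg hj]
    rw [pvLoopJ_eq_true_iff] at hj
    simp only [Bool.false_eq_true, false_iff, not_forall]
    push Not at hj
    obtain ⟨k, hk, hik, hEq⟩ := hj
    exact ⟨i, k, h, hk, le_refl i, by omega, by simp [hEq]⟩
  | case3 i h =>
    rw [pvLoopI, dif_neg h]
    simp only [true_iff]
    intro a b ha hb hia hab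
    omega

theorem portA_eq_true_iff (vuelos : List (String × String)) :
    soloLlegaUnVueloACadaCiudad vuelos = true ↔ (vuelos.map (fun v => v.2)).Nodup := by
  have hnodup : (vuelos.map (fun v => v.2)).Nodup ↔
      ∀ a b (ha : a < vuelos.length) (hb : b < vuelos.length),
        a < b → vuelos[a].2 ≠ vuelos[b].2 := by
    rw [List.Nodup, List.pairwise_iff_getElem]
    simp [List.getElem_map]
  unfold soloLlegaUnVueloACadaCiudad
  split
  · rename_i h1
    simp only [true_iff]
    rw [hnodup]
    intro a b ha hb hab
    simp at h1
    omega
  · rw [pvLoopI_eq_true_iff, hnodup]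
    constructor
    · intro hall a b ha hb hab; exact hall a b ha hb (Nat.zero_le a) hab
    · intro hall a b ha hb _ hab; exact hall a b ha hb hab

theorem portB_eq_true_iff (vuelos : List (String × String)) :
    soloLlegaUnVueloACadaCiudad_alt vuelos = true ↔ (vuelos.map (fun v => v.2)).Nodup := by
  unfold soloLlegaUnVueloACadaCiudad_alt
  set dests := vuelos.map (fun v => v.2) with hd
  simp only [beq_iff_eq]
  constructor
  · intro hlen
    have hsub : List.Subperm (PySem.Set.ofList dests) dests :=
      (PySem.Set.nodup_ofList dests).subperm (fun x hx => (PySem.Set.mem_ofList dests x).1 hx)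
    have hperm : List.Perm (PySem.Set.ofList dests) dests :=
      hsub.perm_of_length_le (le_of_eq hlen.symm)
    exact hperm.symm.nodup_iff.mpr (PySem.Set.nodup_ofList dests)
  · intro hnd
    rw [PySem.Set.ofList_eq_self_of_nodup dests hnd]

-- ===== VERDICT (by name: the statement is the Claim_ definition above) =====
theorem soloLlegaUnVueloACadaCiudad_spec : Claim_equal_soloLlegaUnVueloACadaCiudad := by
  intro vuelos _
  unfold Spec_soloLlegaUnVueloACadaCiudad
  by_cases h : (vuelos.map (fun v => v.2)).Nodup
  · rw [(portA_eq_true_iff vuelos).2 h, ((portB_eq_true_iff vuelos).2 h).symm]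
  · have ha := (portA_eq_true_iff vuelos).not.2 h
    have hb := (portB_eq_true_iff vuelos).not.2 h
    simp only [Bool.not_eq_true] at ha hb
    rw [ha, hb]
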